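-- pv_equiv track=rewrite | github.com/AvelChoi/Baekjoon_study | 5430_fail.py | solution
-- ===== SOURCE A (Python) =====
-- def solution(p, n, numbers):
--     if n == 0:
--         numbers = []
--
--     # left, right 변수를 이용해 인덱스를 조절
--     # 실제로 pop과 같은 연산을 거치지 않더라도 비슷한 효과를 낼 수 있다.
--     l, r, re = 0, 0, True
--
--     for process in p:
--         if process == 'R':
--             # re 변수를 통해 뒤집는지 판별
--             re = not re
--         else:
--             if re is True:
--                 l += 1
--             else:
--                 r += 1
--
--     if r + l <= n:
--         answer = numbers[l:n - r]
--
--         # 정방향일 경우 그대로 출력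
--         if re is True:
--             return '[' + ','.join(answer) + ']'
--         # 뒤집혔을 경우 바꾸기
--         else:
--             return "[" + ",".join(answer[::-1]) + "]"
--     else:
--         return 'error'
-- ===== SOURCE B (Python) =====
-- def solution(p, n, numbers):
--     if n == 0:
--         numbers = []
--     segs = p.split('R')
--     rev = len(segs) % 2 == 0
--     l = sum(len(s) for s in segs[0::2])
--     r = sum(len(s) for s in segs[1::2])
--     if l + r > n:
--         return 'error'
--     kept = numbers[l:n - r]
--     if rev:
--         kept = kept[::-1]
--     return '[' + ','.join(kept) + ']'
-- ===== Notes on version B (the rewrite author's own statement) =====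
-- stated objective: alternative
-- what changed: Replaces the per-character loop with flag/counters by splitting p on 'R': segment count parity gives the final orientation, and the left/right pop counts are the total lengths of the even- and odd-indexed segments.
import Mathlib
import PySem

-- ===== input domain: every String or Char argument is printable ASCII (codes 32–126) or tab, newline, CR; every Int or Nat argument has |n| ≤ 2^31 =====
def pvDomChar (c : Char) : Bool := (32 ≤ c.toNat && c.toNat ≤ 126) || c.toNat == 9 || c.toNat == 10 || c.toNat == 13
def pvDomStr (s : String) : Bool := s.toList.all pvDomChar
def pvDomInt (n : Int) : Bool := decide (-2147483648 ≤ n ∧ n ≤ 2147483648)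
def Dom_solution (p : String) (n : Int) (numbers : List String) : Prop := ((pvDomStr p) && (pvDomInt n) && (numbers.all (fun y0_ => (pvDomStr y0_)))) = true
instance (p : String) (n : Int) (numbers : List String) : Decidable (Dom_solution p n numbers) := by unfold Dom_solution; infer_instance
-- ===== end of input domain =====

-- B computes the same answer by splitting p on 'R' (parity of the segment count = orientation,
-- segment lengths at even/odd positions = left/right pop counts) instead of A's per-character loop.

-- ===== PORT A =====
-- the body of A's for-loop (one Python iteration on state (l, r, re))
def pvStepA (st : Int × Int × Bool) (c : Char) : Int × Int × Bool :=
  if c == 'R' then (st.1, st.2.1, !st.2.2)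
  else if st.2.2 then (st.1 + 1, st.2.1, st.2.2)
  else (st.1, st.2.1 + 1, st.2.2)

def solution (p : String) (n : Int) (numbers : List String) : String :=
  let numbers := if n == 0 then [] else numbers
  let st := p.toList.foldl pvStepA (0, 0, true)
  if st.2.1 + st.1 ≤ n then
    let answer := PySem.List.slice numbers (some st.1) (some (n - st.2.1))
    if st.2.2 then "[" ++ PySem.Str.join "," answer ++ "]"
    else "[" ++ PySem.Str.join "," answer.reverse ++ "]"
  else "error"

-- ===== PORT B =====
-- hand port of p.split('R') for the one-character separator (exact: keeps empty pieces, "".split → [""])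
def splitR : List Char → List (List Char)
  | [] => [[]]
  | c :: cs =>
    let rest := splitR cs
    if c = 'R' then [] :: rest
    else
      match rest with
      | [] => [[c]]
      | h :: t => (c :: h) :: t

-- segs[0::2] (every other element starting at index 0)
def pvEvens {α : Type} : List α → List α
  | [] => []
  | [x] => [x]
  | x :: _ :: xs => x :: pvEvens xs

-- segs[1::2]
def pvOdds {α : Type} (xs : List α) : List α := pvEvens (xs.drop 1)

def solution_alt (p : String) (n : Int) (numbers : List String) : String :=
  let numbers := if n == 0 then [] else numbers
  let segs := splitR p.toList
  let rev := segs.length % 2 == 0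
  let l : Int := ((pvEvens segs).map (fun s => (s.length : Int))).sum
  let r : Int := ((pvOdds segs).map (fun s => (s.length : Int))).sum
  if l + r > n then "error"
  else
    let kept := PySem.List.slice numbers (some l) (some (n - r))
    let kept := if rev then kept.reverse else kept
    "[" ++ PySem.Str.join "," kept ++ "]"

-- ===== PRECONDITION & SPEC =====
def Spec_solution (p : String) (n : Int) (numbers : List String) (out : String) : Prop := out = solution_alt p n numbers
instance (p : String) (n : Int) (numbers : List String) (out : String) : Decidable (Spec_solution p n numbers out) := by unfold Spec_solution; infer_instance

-- ===== CLAIM (what is proved, stated in full; the proofs are below) =====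
def Claim_equal_solution : Prop := ∀ (p : String) (n : Int) (numbers : List String), Dom_solution p n numbers → Spec_solution p n numbers (solution p n numbers)

-- ===== LEMMAS AND PROOFS =====

def pvSE (cs : List Char) : Int := ((pvEvens (splitR cs)).map (fun s => (s.length : Int))).sum
def pvSO (cs : List Char) : Int := ((pvOdds (splitR cs)).map (fun s => (s.length : Int))).sum

theorem pvEvens_cons {α : Type} (x : α) (xs : List α) :
    pvEvens (x :: xs) = x :: pvEvens (xs.drop 1) := by
  cases xs <;> simp [pvEvens]

theorem splitR_ne_nil (cs : List Char) : splitR cs ≠ [] := by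
  cases cs with
  | nil => simp [splitR]
  | cons c cs =>
    simp only [splitR]
    split
    · simp
    · cases h : splitR cs <;> simp

theorem pvParityFlip (m : Nat) : ((m + 1) % 2 == 1) = !(m % 2 == 1) := by
  rcases Nat.mod_two_eq_zero_or_one m with h | h <;> simp [Nat.add_mod, h]

theorem pv_loop_eq (cs : List Char) (l r : Int) (re : Bool) :
    cs.foldl pvStepA (l, r, re)
    = (l + (if re then pvSE cs else pvSO cs),
       r + (if re then pvSO cs else pvSE cs),
       re == ((splitR cs).length % 2 == 1)) := by
  induction cs generalizing l r re with
  | nil =>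
    simp [pvSE, pvSO, pvOdds, splitR, pvEvens]
  | cons c cs ih =>
    by_cases hc : c = 'R'
    · subst hc
      have hE : pvSE ('R' :: cs) = pvSO cs := by
        simp [pvSE, pvSO, pvOdds, splitR, pvEvens_cons]
      have hO : pvSO ('R' :: cs) = pvSE cs := by
        simp [pvSO, pvSE, pvOdds, splitR]
      have hL : (splitR ('R' :: cs)).length = (splitR cs).length + 1 := by
        simp [splitR]
      have hstep : pvStepA (l, r, re) 'R' = (l, r, !re) := by simp [pvStepA]
      rw [List.foldl_cons, hstep, ih, hE, hO, hL]
      rcases re <;> simp [pvParityFlip]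
    · obtain ⟨h, t, hs⟩ : ∃ h t, splitR cs = h :: t := by
        cases hsp : splitR cs with
        | nil => exact absurd hsp (splitR_ne_nil cs)
        | cons h t => exact ⟨h, t, rfl⟩
      have hsplit : splitR (c :: cs) = (c :: h) :: t := by
        simp [splitR, hc, hs]
      have hE : pvSE (c :: cs) = pvSE cs + 1 := by
        simp [pvSE, hsplit, hs, pvEvens_cons]; omega
      have hO : pvSO (c :: cs) = pvSO cs := by
        simp [pvSO, pvOdds, hsplit, hs]
      have hL : (splitR (c :: cs)).length = (splitR cs).length := by
        simp [hsplit, hs]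
      rw [List.foldl_cons, hE, hO, hL]
      rcases re with _ | _
      · have hstep : pvStepA (l, r, false) c = (l, r + 1, false) := by
          simp [pvStepA, hc]
        rw [hstep, ih]
        simp; omega
      · have hstep : pvStepA (l, r, true) c = (l + 1, r, true) := by
          simp [pvStepA, hc]
        rw [hstep, ih]
        simp; omega

-- ===== VERDICT (by name: the statement is the Claim_ definition above) =====
theorem solution_spec : Claim_equal_solution := by
  intro p n numbers _
  show solution p n numbers = solution_alt p n numbers
  unfold solution solution_alt
  rw [pv_loop_eq]
  simp only [if_true, Bool.true_beq, Int.zero_add, pvSE, pvSO]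
  rcases hpar : ((splitR p.toList).length % 2 == 1) with _ | _
  · have hrev : ((splitR p.toList).length % 2 == 0) = true := by
      simp at hpar ⊢; omega
    simp only [hrev, if_true, Bool.false_eq_true, if_false]
    split_ifs with h1 h2 <;> first | rfl | omega
  · have hrev : ((splitR p.toList).length % 2 == 0) = false := by
      simp at hpar ⊢; omega
    simp only [hrev, if_true, Bool.false_eq_true, if_false]
    split_ifs with h1 h2 <;> first | rfl | omega
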